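-- pv_equiv track=rewrite | github.com/comfyanonymous/ComfyUI | comfy_extras/nodes/nodes_inpainting.py | parse_margin
-- ===== SOURCE A (Python) =====
-- def parse_margin(margin_str: str) -> tuple[int, int, int, int]:
--     parts = [int(p) for p in margin_str.strip().split()]
--     match len(parts):
--         case 1:
--             return parts[0], parts[0], parts[0], parts[0]
--         case 2:
--             return parts[0], parts[1], parts[0], parts[1]
--         case 3:
--             return parts[0], parts[1], parts[2], parts[1]
--         case 4:
--             return parts[0], parts[1], parts[2], parts[3]
--         case _:
--             raise ValueError("Invalid margin format.")
-- ===== SOURCE B (Python) =====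
-- def parse_margin(margin_str: str) -> tuple[int, int, int, int]:
--     parts = [int(p) for p in margin_str.strip().split()]
--     if not 1 <= len(parts) <= 4:
--         raise ValueError("Invalid margin format.")
--     # CSS shorthand rule: each missing value mirrors its opposite side,
--     # i.e. append parts[-2] (parts[0] when only one value is present).
--     while len(parts) < 4:
--         parts.append(parts[max(0, len(parts) - 2)])
--     return tuple(parts)
-- ===== Notes on version B (the rewrite author's own statement) =====
-- stated objective: alternative
-- what changed: Replaces A's four-way match returning hand-written tuples by the CSS shorthand padding rule: one loop that extends the parsed list to length 4 by appending the mirror element parts[max(0, len-2)], then returns the list as a tuple.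
import Mathlib
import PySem

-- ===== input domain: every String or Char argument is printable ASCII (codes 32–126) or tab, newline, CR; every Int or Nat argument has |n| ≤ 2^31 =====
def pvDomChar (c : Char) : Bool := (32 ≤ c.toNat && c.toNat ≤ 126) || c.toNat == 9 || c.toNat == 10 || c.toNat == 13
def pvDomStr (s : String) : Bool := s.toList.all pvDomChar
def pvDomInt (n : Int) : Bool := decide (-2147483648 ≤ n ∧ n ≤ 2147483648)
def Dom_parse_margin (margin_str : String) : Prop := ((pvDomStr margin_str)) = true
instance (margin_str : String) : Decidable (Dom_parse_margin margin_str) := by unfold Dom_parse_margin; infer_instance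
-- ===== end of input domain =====

-- B replaces A's four-way match by the CSS mirror-padding loop (alternative decomposition; same cost).

-- ===== PORT A =====
-- A: parts = [int(p) for p in margin_str.strip().split()], then match len(parts) with literal tuples.
-- int(p) that fails (ValueError) and len(parts) ∉ 1..4 (raise ValueError) are excluded by Pre_.
def parse_margin (margin_str : String) : Int × Int × Int × Int :=
  let parts := (PySem.Str.split₀ (PySem.Str.strip margin_str)).map
    (fun p => (PySem.Int.ofStr? p).getD 0)
  match parts with
  | [a] => (a, a, a, a)
  | [a, b] => (a, b, a, b)
  | [a, b, c] => (a, b, c, b)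
  | [a, b, c, d] => (a, b, c, d)
  | _ => (0, 0, 0, 0)  -- raise ValueError("Invalid margin format."); outside Pre_

-- ===== PORT B =====
-- while len(parts) < 4: parts.append(parts[max(0, len(parts) - 2)])  — fuel-bounded transliteration
def pvPad : Nat → List Int → List Int
  | 0, ps => ps
  | n + 1, ps =>
      if ps.length < 4 then
        pvPad n (ps ++ [(PySem.List.pyGet? ps (max 0 ((ps.length : Int) - 2))).getD 0])
      else ps

def parse_margin_alt (margin_str : String) : Int × Int × Int × Int :=
  let parts := (PySem.Str.split₀ (PySem.Str.strip margin_str)).map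
    (fun p => (PySem.Int.ofStr? p).getD 0)
  if 1 ≤ parts.length ∧ parts.length ≤ 4 then
    -- tuple(parts) on the padded length-4 list
    let q := pvPad 4 parts
    ((PySem.List.pyGet? q 0).getD 0, (PySem.List.pyGet? q 1).getD 0,
     (PySem.List.pyGet? q 2).getD 0, (PySem.List.pyGet? q 3).getD 0)
  else (0, 0, 0, 0)  -- raise ValueError("Invalid margin format."); outside Pre_

-- ===== PRECONDITION & SPEC =====
-- Pre_ excludes exactly the inputs where the Python A raises ValueError: a token that is not
-- a valid int literal, or a whitespace-split token count outside 1..4 (B raises there too).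
def Pre_parse_margin (margin_str : String) : Prop :=
  let parts := PySem.Str.split₀ (PySem.Str.strip margin_str)
  (parts.all fun p => (PySem.Int.ofStr? p).isSome) = true ∧
  1 ≤ parts.length ∧ parts.length ≤ 4
instance (margin_str : String) : Decidable (Pre_parse_margin margin_str) := by
  unfold Pre_parse_margin; infer_instance

def pvWitness_parse_margin : String := "1 2 3"

def Spec_parse_margin (margin_str : String) (out : Int × Int × Int × Int) : Prop := out = parse_margin_alt margin_str
instance (margin_str : String) (out : Int × Int × Int × Int) : Decidable (Spec_parse_margin margin_str out) := by unfold Spec_parse_margin; infer_instance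

-- ===== CLAIM (what is proved, stated in full; the proofs are below) =====
def Claim_equal_parse_margin : Prop := ∀ (margin_str : String), Dom_parse_margin margin_str → Pre_parse_margin margin_str → Spec_parse_margin margin_str (parse_margin margin_str)

-- ===== LEMMAS AND PROOFS =====

-- ===== VERDICT (by name: the statement is the Claim_ definition above) =====
theorem parse_margin_spec : Claim_equal_parse_margin := by
  intro s _ hpre
  obtain ⟨_, h1, h4⟩ := hpre
  unfold Spec_parse_margin parse_margin parse_margin_alt
  rcases hE : PySem.Str.split₀ (PySem.Str.strip s) with _ | ⟨a, _ | ⟨b, _ | ⟨c, _ | ⟨d, _ | ⟨e, t⟩⟩⟩⟩⟩ <;>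
    simp only [hE] at h1 h4 ⊢
  · exact absurd h1 (by simp)
  · simp [pvPad, PySem.List.pyGet?, PySem.List.pyIdx?]

  · simp [pvPad, PySem.List.pyGet?, PySem.List.pyIdx?]

  · simp [pvPad, PySem.List.pyGet?, PySem.List.pyIdx?]

  · simp [pvPad, PySem.List.pyGet?, PySem.List.pyIdx?]

  · exact absurd h4 (by simp)
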